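-- pv_equiv track=rewrite | github.com/BradleyWang0416/ContextAwarePoseFormer_Private | H36M-Toolbox/preprocess_amassExtra_byBradley.py | split_valid_sequences
-- ===== SOURCE A (Python) =====
-- def split_valid_sequences(valid_indices, min_length=16):
--     """
--     Given sorted valid frame indices, split them into continuous sequences.
--     Returns a list of (start_idx, end_idx) tuples where each range is inclusive.
--     """
--     if len(valid_indices) == 0:
--         return []
--
--     splits = []
--     start = valid_indices[0]
--     prev = start
--
--     for idx in valid_indices[1:]:
--         if idx == prev + 1:
--             prev = idx
--         else:
--             if prev - start + 1 >= min_length: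
--                 splits.append((start, prev))
--             start = idx
--             prev = idx
--     if prev - start + 1 >= min_length:
--         splits.append((start, prev))
--     return splits
-- ===== SOURCE B (Python) =====
-- def split_valid_sequences(valid_indices, min_length=16):
--     """
--     Given sorted valid frame indices, split them into continuous sequences.
--     Returns a list of (start_idx, end_idx) tuples where each range is inclusive.
--     """
--     # group-by the classic "value minus position" key: consecutive integers share a key
--     keyed = [(v - i, v) for i, v in enumerate(valid_indices)]
--     groups = []
--     for k, v in keyed:
--         if groups and groups[-1][-1][0] == k:
--             groups[-1].append((k, v))
--         else:
--             groups.append([(k, v)])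
--     return [(g[0][1], g[-1][1]) for g in groups
--             if g[-1][1] - g[0][1] + 1 >= min_length]
-- ===== Notes on version B (the rewrite author's own statement) =====
-- stated objective: idiomatic
-- what changed: Replaces A's start/prev/break bookkeeping with a group-by pipeline: key each element by value-minus-position (consecutive integers share a key), collect equal-key groups, then map each group to (first, last) and filter by length.
import Mathlib
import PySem

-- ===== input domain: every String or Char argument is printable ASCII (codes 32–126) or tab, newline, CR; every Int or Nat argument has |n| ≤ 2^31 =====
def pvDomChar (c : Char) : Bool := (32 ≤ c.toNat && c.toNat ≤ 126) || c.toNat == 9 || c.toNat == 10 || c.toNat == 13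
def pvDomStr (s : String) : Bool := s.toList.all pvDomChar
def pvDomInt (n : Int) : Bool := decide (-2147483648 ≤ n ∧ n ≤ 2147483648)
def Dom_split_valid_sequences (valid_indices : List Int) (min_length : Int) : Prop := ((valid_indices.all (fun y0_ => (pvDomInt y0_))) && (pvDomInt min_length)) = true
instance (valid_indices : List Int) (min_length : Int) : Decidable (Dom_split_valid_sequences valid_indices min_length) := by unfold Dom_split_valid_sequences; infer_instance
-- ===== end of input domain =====

-- B replaces A's start/prev/break bookkeeping by a group-by on the "value minus position" key
-- (consecutive integers share a key), then maps each group to (first, last) and filters by length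
-- — same result, a different decomposition (idiomatic group-by pipeline).

-- ===== PORT A =====
-- the loop body of A: state = (splits, start, prev)
def pvStepA (min_length : Int) (s : List (Int × Int) × Int × Int) (idx : Int) :
    List (Int × Int) × Int × Int :=
  if idx = s.2.2 + 1 then (s.1, s.2.1, idx)
  else ((if s.2.2 - s.2.1 + 1 ≥ min_length then s.1 ++ [(s.2.1, s.2.2)] else s.1), idx, idx)

def split_valid_sequences (valid_indices : List Int) (min_length : Int) : List (Int × Int) :=
  match valid_indices with
  | [] => []
  | v0 :: rest =>                         -- start = valid_indices[0]; prev = start; loop over valid_indices[1:]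
    let st := rest.foldl (pvStepA min_length) ([], v0, v0)
    if st.2.2 - st.2.1 + 1 ≥ min_length then st.1 ++ [(st.2.1, st.2.2)] else st.1

-- ===== PORT B =====
-- the loop body of B's grouping loop; groups are kept reversed, each group reversed
-- (Python appends at the end of the last group; cons on the reversed representation)
def pvGroupStep (rgs : List (List (Int × Int))) (kv : Int × Int) : List (List (Int × Int)) :=
  match rgs with
  | (p :: g) :: rest => if p.1 = kv.1 then (kv :: p :: g) :: rest else [kv] :: (p :: g) :: rest
  | _ => [kv] :: rgs

def split_valid_sequences_alt (valid_indices : List Int) (min_length : Int) : List (Int × Int) :=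
  let keyed := (PySem.List.enumerate valid_indices).map (fun p => (p.2 - p.1, p.2))
  let rgs := keyed.foldl pvGroupStep []
  let groups := (rgs.map List.reverse).reverse
  groups.filterMap (fun g =>
    match g with
    | [] => none
    | p :: t =>
      let last := (p :: t).getLast (by simp)
      if last.2 - p.2 + 1 ≥ min_length then some (p.2, last.2) else none)

-- ===== PRECONDITION & SPEC =====
def Spec_split_valid_sequences (valid_indices : List Int) (min_length : Int) (out : List (Int × Int)) : Prop := out = split_valid_sequences_alt valid_indices min_length
instance (valid_indices : List Int) (min_length : Int) (out : List (Int × Int)) : Decidable (Spec_split_valid_sequences valid_indices min_length out) := by unfold Spec_split_valid_sequences; infer_instance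

-- ===== CLAIM (what is proved, stated in full; the proofs are below) =====
def Claim_equal_split_valid_sequences : Prop := ∀ (valid_indices : List Int) (min_length : Int), Dom_split_valid_sequences valid_indices min_length → Spec_split_valid_sequences valid_indices min_length (split_valid_sequences valid_indices min_length)

-- ===== LEMMAS AND PROOFS =====

-- maximal runs of +1-consecutive values, as (first, last) pairs
def pvRuns : List Int → List (Int × Int)
  | [] => []
  | v :: rest =>
    match pvRuns rest with
    | [] => [(v, v)]
    | (a, b) :: gs => if a = v + 1 then (v, b) :: gs else (v, v) :: (a, b) :: gs

-- keep runs of length ≥ ml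
def pvE (ml : Int) (rs : List (Int × Int)) : List (Int × Int) :=
  rs.filterMap (fun r => if r.2 - r.1 + 1 ≥ ml then some r else none)

-- glue a pending run (start..prev) onto the run list of the remaining input
def pvGlue (start prev : Int) (rs : List (Int × Int)) : List (Int × Int) :=
  match rs with
  | [] => [(start, prev)]
  | (a, b) :: gs => if a = prev + 1 then (start, b) :: gs else (start, prev) :: (a, b) :: gs

-- the final emission step of A, written without a let
def pvFinishA (ml : Int) (st : List (Int × Int) × Int × Int) : List (Int × Int) :=
  if st.2.2 - st.2.1 + 1 ≥ ml then st.1 ++ [(st.2.1, st.2.2)] else st.1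

theorem pvE_cons (ml : Int) (r : Int × Int) (rs : List (Int × Int)) :
    pvE ml (r :: rs) = pvE ml [r] ++ pvE ml rs := by
  simp only [pvE, List.filterMap_cons, List.filterMap_nil]
  split_ifs <;> simp

theorem pvRuns_head (v : Int) (l : List Int) :
    ∃ b gs, pvRuns (v :: l) = (v, b) :: gs := by
  rcases hr : pvRuns l with _ | ⟨⟨a, b⟩, gs⟩
  · exact ⟨v, [], by simp [pvRuns, hr]⟩
  · by_cases h : a = v + 1
    · exact ⟨b, gs, by simp [pvRuns, hr, h]⟩
    · exact ⟨v, (a, b) :: gs, by simp [pvRuns, hr, h]⟩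

theorem pvGlue_step (start prev : Int) (l : List Int) :
    pvGlue start prev (pvRuns ((prev + 1) :: l)) = pvGlue start (prev + 1) (pvRuns l) := by
  simp only [pvRuns]
  rcases pvRuns l with _ | ⟨⟨a, b⟩, gs⟩
  · simp [pvGlue]
  · by_cases h : a = prev + 1 + 1 <;> simp [h, pvGlue]

theorem pvGlue_self (v : Int) (l : List Int) :
    pvGlue v v (pvRuns l) = pvRuns (v :: l) := by
  simp only [pvRuns]
  rcases pvRuns l with _ | ⟨⟨a, b⟩, gs⟩
  · simp [pvGlue]
  · by_cases h : a = v + 1 <;> simp [h, pvGlue]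

theorem pvGlue_ne (start prev v : Int) (l : List Int) (h : v ≠ prev + 1) :
    pvGlue start prev (pvRuns (v :: l)) = (start, prev) :: pvRuns (v :: l) := by
  obtain ⟨b, gs, hb⟩ := pvRuns_head v l
  rw [hb]; simp [pvGlue, h]

theorem pvStepA_eq (ml : Int) (acc : List (Int × Int)) (start prev : Int) :
    pvStepA ml (acc, start, prev) (prev + 1) = (acc, start, prev + 1) := by
  simp [pvStepA]

theorem pvStepA_ne (ml : Int) (acc : List (Int × Int)) (start prev v : Int) (h : v ≠ prev + 1) :
    pvStepA ml (acc, start, prev) v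
    = ((if prev - start + 1 ≥ ml then acc ++ [(start, prev)] else acc), v, v) := by
  simp [pvStepA, h]

-- A-side: the loop with pending run (start..prev) and accumulator acc
theorem lemA (ml : Int) (l : List Int) : ∀ (start prev : Int) (acc : List (Int × Int)),
    pvFinishA ml (l.foldl (pvStepA ml) (acc, start, prev))
    = acc ++ pvE ml (pvGlue start prev (pvRuns l)) := by
  induction l with
  | nil =>
    intro start prev acc
    simp only [List.foldl_nil, pvFinishA, pvRuns, pvGlue, pvE,
      List.filterMap_cons, List.filterMap_nil]
    split_ifs with h <;> simp
  | cons v l ih =>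
    intro start prev acc
    simp only [List.foldl_cons]
    by_cases h : v = prev + 1
    · subst h
      rw [pvStepA_eq, ih start (prev + 1) acc, pvGlue_step]
    · rw [pvStepA_ne ml acc start prev v h, ih v v _, pvGlue_self,
        pvGlue_ne start prev v l h, pvE_cons]
      simp only [pvE, List.filterMap_cons, List.filterMap_nil]
      split_ifs <;> simp

-- keyed list built by B, starting at position i
def pvKeyedFrom (i : Int) : List Int → List (Int × Int)
  | [] => []
  | v :: rest => (v - i, v) :: pvKeyedFrom (i + 1) rest

theorem pvKeyed_eq (l : List Int) : ∀ i : Int,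
    (PySem.List.enumerate l i).map (fun p => (p.2 - p.1, p.2)) = pvKeyedFrom i l := by
  induction l with
  | nil => intro i; simp [PySem.List.enumerate_nil, pvKeyedFrom]
  | cons v l ih => intro i; simp [PySem.List.enumerate_cons, pvKeyedFrom, ih]

-- B's per-group emission, and its finalisation of the reversed group list
def pvFb (ml : Int) (g : List (Int × Int)) : Option (Int × Int) :=
  match g with
  | [] => none
  | p :: t =>
    let last := (p :: t).getLast (by simp)
    if last.2 - p.2 + 1 ≥ ml then some (p.2, last.2) else none

def pvFin (ml : Int) (rgs : List (List (Int × Int))) : List (Int × Int) :=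
  ((rgs.map List.reverse).reverse).filterMap (pvFb ml)

-- pvFb through head?/getLast? (no proof-carrying arguments)
theorem pvFb_opt (ml : Int) (g : List (Int × Int)) :
    pvFb ml g = match g.head?, g.getLast? with
      | some p, some q => if q.2 - p.2 + 1 ≥ ml then some (p.2, q.2) else none
      | _, _ => none := by
  cases g with
  | nil => rfl
  | cons p t =>
    simp only [pvFb, List.head?_cons, List.getLast?_eq_some_getLast (l := p :: t) (by simp)]

theorem pvGroupStep_eq (p : Int × Int) (g : List (Int × Int))
    (rest : List (List (Int × Int))) (kv : Int × Int) (h : p.1 = kv.1) :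
    pvGroupStep ((p :: g) :: rest) kv = (kv :: p :: g) :: rest := by
  simp [pvGroupStep, h]

theorem pvGroupStep_ne (p : Int × Int) (g : List (Int × Int))
    (rest : List (List (Int × Int))) (kv : Int × Int) (h : p.1 ≠ kv.1) :
    pvGroupStep ((p :: g) :: rest) kv = [kv] :: (p :: g) :: rest := by
  simp [pvGroupStep, h]

-- emitting a closed (reversed) group (k, prev) :: cTail yields the pending run (start, prev)
theorem pvFin_cons (ml k prev : Int) (cTail : List (Int × Int))
    (rgs : List (List (Int × Int))) :
    pvFin ml (((k, prev) :: cTail) :: rgs)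
    = pvFin ml rgs ++ pvE ml [((((k, prev) :: cTail).getLast (by simp)).2, prev)] := by
  have hsplit : (((((k, prev) :: cTail) :: rgs).map List.reverse).reverse)
      = ((rgs.map List.reverse).reverse) ++ [((k, prev) :: cTail).reverse] := by simp
  show (((((k, prev) :: cTail) :: rgs).map List.reverse).reverse).filterMap (pvFb ml) = _
  rw [hsplit, List.filterMap_append]
  congr 1
  rw [List.filterMap_cons, List.filterMap_nil, pvFb_opt, List.head?_reverse,
    List.getLast?_reverse, List.head?_cons,
    List.getLast?_eq_some_getLast (l := (k, prev) :: cTail) (by simp)]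
  simp only [pvE, List.filterMap_cons, List.filterMap_nil]

-- B-side: the grouping loop with an open group (k, prev) :: cTail on top
theorem lemB (ml : Int) (l : List Int) : ∀ (i prev : Int) (cTail : List (Int × Int))
    (rgs : List (List (Int × Int))),
    pvFin ml ((pvKeyedFrom i l).foldl pvGroupStep (((prev - (i - 1), prev) :: cTail) :: rgs))
    = pvFin ml rgs ++
      pvE ml (pvGlue ((((prev - (i - 1), prev) :: cTail).getLast (by simp)).2) prev (pvRuns l)) := by
  induction l with
  | nil =>
    intro i prev cTail rgs
    simp only [pvKeyedFrom, List.foldl_nil, pvGlue, pvRuns]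
    exact pvFin_cons ml _ prev cTail rgs
  | cons v l ih =>
    intro i prev cTail rgs
    simp only [pvKeyedFrom, List.foldl_cons]
    by_cases h : v = prev + 1
    · have hk : (prev - (i - 1), prev).1 = ((v - i, v) : Int × Int).1 := by simp; omega
      rw [pvGroupStep_eq _ _ _ _ hk]
      have hmain := ih (i + 1) v ((v - i, prev) :: cTail) rgs
      have hk2 : v - (i + 1 - 1) = v - i := by omega
      rw [hk2] at hmain
      have hk3 : prev - (i - 1) = v - i := by omega
      rw [hk3, hmain]
      congr 2
      rw [h, pvGlue_step]
      exact congrArg (fun q : Int × Int => pvGlue q.2 (prev + 1) (pvRuns l))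
        (List.getLast_cons (l := (prev + 1 - i, prev) :: cTail) (by simp))
    · have hk : (prev - (i - 1), prev).1 ≠ ((v - i, v) : Int × Int).1 := by simp; omega
      rw [pvGroupStep_ne _ _ _ _ hk]
      have hmain := ih (i + 1) v [] (((prev - (i - 1), prev) :: cTail) :: rgs)
      have hk2 : v - (i + 1 - 1) = v - i := by omega
      rw [hk2] at hmain
      rw [hmain, pvFin_cons, List.append_assoc]
      congr 1
      simp only [List.getLast_singleton]
      rw [pvGlue_self, pvGlue_ne _ prev v l h]
      exact (pvE_cons ml _ _).symm

-- unfold B to the pvFin form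
theorem alt_eq (vi : List Int) (ml : Int) :
    split_valid_sequences_alt vi ml = pvFin ml ((pvKeyedFrom 0 vi).foldl pvGroupStep []) := by
  unfold split_valid_sequences_alt pvFin
  rw [pvKeyed_eq]
  rfl

-- ===== VERDICT (by name: the statement is the Claim_ definition above) =====
theorem split_valid_sequences_spec : Claim_equal_split_valid_sequences := by
  intro vi ml _
  unfold Spec_split_valid_sequences
  rcases vi with _ | ⟨v0, rest⟩
  · simp [split_valid_sequences, alt_eq, pvKeyedFrom, pvFin]
  · have hA0 : split_valid_sequences (v0 :: rest) ml
        = pvFinishA ml (rest.foldl (pvStepA ml) ([], v0, v0)) := rfl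
    rw [hA0, lemA ml rest v0 v0 [], alt_eq]
    have hkey : pvKeyedFrom 0 (v0 :: rest) = (v0 - 0, v0) :: pvKeyedFrom 1 rest := by
      simp only [pvKeyedFrom]; norm_num
    rw [hkey, List.foldl_cons]
    have hstep : pvGroupStep [] (v0 - 0, v0) = [[(v0 - 0, v0)]] := rfl
    rw [hstep]
    have hB := lemB ml rest 1 v0 [] []
    have e1 : v0 - (1 - 1) = v0 - 0 := by norm_num
    rw [e1] at hB
    simp only [List.getLast_singleton] at hB
    rw [hB]
    simp [pvFin]
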